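-- pv_equiv track=rewrite | github.com/openreview-neurlps/WhyLab | experiments/archive/reflexion_loop.py | _detect_body_indent
-- ===== SOURCE A (Python) =====
-- def _detect_body_indent(prompt: str) -> int:
--     """Detect the expected indentation for function body from prompt.
--
--     Looks at the last non-empty line of the prompt (typically a docstring
--     closing or empty line after docstring) to determine the indentation.
--     """
--     lines = prompt.rstrip().split("\n")
--     for line in reversed(lines):
--         stripped = line.lstrip()
--         if stripped:
--             indent = len(line) - len(stripped)
--             return indent
--     return 4  # default
-- ===== SOURCE B (Python) =====
-- def _detect_body_indent(prompt: str) -> int: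
--     """Detect the expected indentation for function body from prompt.
--
--     After rstrip() the final line is the last non-blank line, so slice it
--     out directly instead of splitting and scanning the lines in reverse.
--     """
--     s = prompt.rstrip()
--     last = s[s.rfind("\n") + 1:]
--     if not last:
--         return 4
--     return len(last) - len(last.lstrip())
-- ===== Notes on version B (the rewrite author's own statement) =====
-- stated objective: simpler
-- what changed: B drops the split-into-lines list and the reversed scan loop: since rstrip() leaves a non-blank final line (or an empty string), B slices the last line out directly with rfind of the newline character and measures its leading whitespace.
import Mathlib
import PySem

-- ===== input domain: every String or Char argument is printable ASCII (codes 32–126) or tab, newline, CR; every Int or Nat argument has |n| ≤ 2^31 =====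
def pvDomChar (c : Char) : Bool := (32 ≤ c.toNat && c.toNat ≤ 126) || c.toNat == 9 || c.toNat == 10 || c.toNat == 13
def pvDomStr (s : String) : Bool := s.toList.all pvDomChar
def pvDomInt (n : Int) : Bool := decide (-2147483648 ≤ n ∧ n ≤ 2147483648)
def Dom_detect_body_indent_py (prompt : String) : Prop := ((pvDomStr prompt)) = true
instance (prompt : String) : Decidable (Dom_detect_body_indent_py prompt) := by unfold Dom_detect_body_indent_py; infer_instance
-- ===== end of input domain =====

-- B replaces A's split-into-lines + reversed scan loop by slicing the last line out
-- directly with rfind after rstrip (simpler; same asymptotic cost).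

-- ===== PORT A =====
-- the 'for line in reversed(lines): … return indent' loop with the trailing 'return 4'
def pvScanA : List (List Char) → Int
  | [] => 4
  | line :: rest =>
    let stripped := PySem.Chars.lstrip line
    if stripped ≠ [] then (line.length : Int) - (stripped.length : Int)
    else pvScanA rest

def detect_body_indent_py (prompt : String) : Int :=
  let lines := PySem.Chars.splitOn (PySem.Chars.rstrip prompt.toList) ['\n']
  pvScanA lines.reverse

-- ===== PORT B =====
def detect_body_indent_py_alt (prompt : String) : Int :=
  let s := PySem.Chars.rstrip prompt.toList
  let last := PySem.Chars.slice s (some (PySem.Chars.rfind s ['\n'] + 1)) none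
  if last = [] then 4
  else (last.length : Int) - ((PySem.Chars.lstrip last).length : Int)

-- ===== PRECONDITION & SPEC =====
def Spec_detect_body_indent_py (prompt : String) (out : Int) : Prop := out = detect_body_indent_py_alt prompt
instance (prompt : String) (out : Int) : Decidable (Spec_detect_body_indent_py prompt out) := by unfold Spec_detect_body_indent_py; infer_instance

-- ===== CLAIM (what is proved, stated in full; the proofs are below) =====
def Claim_equal_detect_body_indent_py : Prop := ∀ (prompt : String), Dom_detect_body_indent_py prompt → Spec_detect_body_indent_py prompt (detect_body_indent_py prompt)

-- ===== LEMMAS AND PROOFS =====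

-- a simple structural model of s.split("\n")
def pvSplit : List Char → List (List Char)
  | [] => [[]]
  | c :: r =>
    if c = '\n' then [] :: pvSplit r
    else
      match pvSplit r with
      | [] => [[c]]
      | x :: xs => (c :: x) :: xs

theorem pvSplit_ne_nil (s : List Char) : pvSplit s ≠ [] := by
  cases s with
  | nil => simp [pvSplit]
  | cons c r =>
    simp only [pvSplit]
    split
    · simp
    · split <;> simp

theorem pv_go (fuel : Nat) : ∀ (l cur : List Char) (acc : List (List Char)),
    l.length < fuel →
    PySem.Chars.splitOn.go ['\n'] fuel l cur acc =
      acc.reverse ++ (match pvSplit l with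
        | [] => [cur.reverse]
        | x :: xs => (cur.reverse ++ x) :: xs) := by
  induction fuel with
  | zero => intro l cur acc h; omega
  | succ n ih =>
    intro l cur acc h
    cases l with
    | nil => simp [PySem.Chars.splitOn.go, pvSplit]
    | cons c rest =>
      simp only [PySem.Chars.splitOn.go]
      by_cases hc : c = '\n'
      · subst hc
        rw [if_pos (by simp [List.isPrefixOf])]
        rw [ih _ _ _ (by simp at h ⊢; omega)]
        simp [pvSplit]
        cases hx : pvSplit rest with
        | nil => exact absurd hx (pvSplit_ne_nil rest)
        | cons x xs => simp
      · rw [if_neg (by simp [List.isPrefixOf]; exact fun h => hc h.symm)]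
        rw [ih _ _ _ (by simp at h ⊢; omega)]
        simp only [pvSplit, if_neg hc]
        cases hx : pvSplit rest with
        | nil => exact absurd hx (pvSplit_ne_nil rest)
        | cons x xs => simp

theorem pv_splitOn_eq (s : List Char) : PySem.Chars.splitOn s ['\n'] = pvSplit s := by
  rw [PySem.Chars.splitOn, pv_go (s.length+1) s [] [] (by omega)]
  cases hx : pvSplit s with
  | nil => exact absurd hx (pvSplit_ne_nil s)
  | cons x xs => simp

theorem pvSplit_snoc (s : List Char) (c : Char) :
    pvSplit (s ++ [c]) =
      if c = '\n' then pvSplit s ++ [[]]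
      else (pvSplit s).dropLast ++ [((pvSplit s).getLastD []) ++ [c]] := by
  induction s with
  | nil =>
    by_cases hc : c = '\n' <;> simp [pvSplit, hc]
  | cons a r ih =>
    simp only [List.cons_append, pvSplit]
    by_cases ha : a = '\n'
    · rw [if_pos ha, if_pos ha, ih]
      by_cases hc : c = '\n'
      · simp [hc]
      · rw [if_neg hc, if_neg hc]
        cases hx : pvSplit r with
        | nil => exact absurd hx (pvSplit_ne_nil r)
        | cons x xs =>
          cases xs with
          | nil => simp
          | cons y ys => simp
    · rw [if_neg ha, if_neg ha, ih]
      by_cases hc : c = '\n'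
      · rw [if_pos hc, if_pos hc]
        cases hx : pvSplit r with
        | nil => exact absurd hx (pvSplit_ne_nil r)
        | cons x xs => simp
      · rw [if_neg hc, if_neg hc]
        cases hx : pvSplit r with
        | nil => exact absurd hx (pvSplit_ne_nil r)
        | cons x xs =>
          cases xs with
          | nil => simp
          | cons y ys => simp

theorem pv_go_bounds (s sub : List Char) (j : Nat) :
    -1 ≤ PySem.Chars.rfind.go s sub j ∧ PySem.Chars.rfind.go s sub j ≤ (j : Int) := by
  induction j with
  | zero =>
    simp only [PySem.Chars.rfind.go]
    split <;> simp
  | succ n ih =>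
    simp only [PySem.Chars.rfind.go]
    split
    · push_cast; omega
    · have := ih.1; have := ih.2; push_cast at *; omega

theorem pv_prefix_nl (l : List Char) :
    List.isPrefixOf ['\n'] l = true ↔ ∃ r, l = '\n' :: r := by
  cases l with
  | nil => simp [List.isPrefixOf]
  | cons a r =>
    constructor
    · intro h
      simp [List.isPrefixOf] at h
      exact ⟨r, by rw [h]⟩
    · rintro ⟨r', hr⟩
      injection hr with h1 h2
      subst h1; subst h2
      simp [List.isPrefixOf]

theorem pv_go_append (s : List Char) (c : Char) (hc : c ≠ '\n') :
    ∀ j : Nat, j ≤ s.length →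
    PySem.Chars.rfind.go (s ++ [c]) ['\n'] j = PySem.Chars.rfind.go s ['\n'] j := by
  intro j
  induction j with
  | zero =>
    intro _
    simp only [PySem.Chars.rfind.go]
    congr 1
    cases s with
    | nil =>
      simp [List.isPrefixOf]
      exact fun h => hc h.symm
    | cons a r => simp [List.isPrefixOf]
  | succ n ih =>
    intro hj
    simp only [PySem.Chars.rfind.go]
    have hdrop : List.drop (n+1) (s ++ [c]) = List.drop (n+1) s ++ [c] :=
      List.drop_append_of_le_length hj
    rw [hdrop]
    by_cases hp : List.isPrefixOf ['\n'] (List.drop (n+1) s) = true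
    · obtain ⟨r, hr⟩ := (pv_prefix_nl _).mp hp
      rw [hr]
      simp [List.isPrefixOf]
    · have hp2 : List.isPrefixOf ['\n'] (List.drop (n+1) s ++ [c]) = false := by
        rw [Bool.eq_false_iff]
        intro h
        obtain ⟨r, hr⟩ := (pv_prefix_nl _).mp h
        cases hd : List.drop (n+1) s with
        | nil => rw [hd] at hr; simp at hr; exact hc hr.1
        | cons a t =>
          apply hp; rw [hd]; rw [hd] at hr; simp at hr
          rw [pv_prefix_nl]; exact ⟨t, by rw [hr.1]⟩
      rw [if_neg (by simp [hp2]), if_neg hp]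
      exact ih (by omega)

theorem pv_go_at (l : List Char) (j : Nat)
    (h : List.isPrefixOf ['\n'] (List.drop j l) = true) :
    PySem.Chars.rfind.go l ['\n'] j = (j : Int) := by
  cases j with
  | zero => simp only [PySem.Chars.rfind.go]; rw [if_pos (by simpa using h)]; rfl
  | succ n => simp only [PySem.Chars.rfind.go]; rw [if_pos h]

theorem pv_rfind_lt (s : List Char) :
    PySem.Chars.rfind s ['\n'] < (s.length : Int) := by
  rw [PySem.Chars.rfind]
  cases hl : s.length with
  | zero =>
    simp only [PySem.Chars.rfind.go]
    rw [if_neg (by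
      have : s = [] := List.length_eq_zero_iff.mp hl
      simp [this])]
    omega
  | succ n =>
    simp only [PySem.Chars.rfind.go]
    rw [if_neg (by
      rw [show List.drop (n+1) s = [] from by
        apply List.drop_eq_nil_of_le; omega]
      simp [List.isPrefixOf])]
    have := (pv_go_bounds s ['\n'] n).2
    push_cast
    omega

theorem pv_rfind_drop (s : List Char) :
    List.drop (PySem.Chars.rfind s ['\n'] + 1).toNat s = (pvSplit s).getLastD [] := by
  induction s using List.reverseRecOn with
  | nil => simp [PySem.Chars.rfind, PySem.Chars.rfind.go, pvSplit, List.isPrefixOf]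
  | append_singleton s c ih =>
    by_cases hc : c = '\n'
    · subst hc
      have h1 : PySem.Chars.rfind (s ++ ['\n']) ['\n'] = (s.length : Int) := by
        rw [PySem.Chars.rfind]
        rw [show (s ++ ['\n']).length = s.length + 1 from by simp]
        simp only [PySem.Chars.rfind.go]
        rw [if_neg (by
          rw [show List.drop (s.length + 1) (s ++ ['\n']) = [] from by
            apply List.drop_eq_nil_of_le; simp]
          simp [List.isPrefixOf])]
        apply pv_go_at
        rw [List.drop_append_of_le_length (le_refl _), List.drop_length]
        simp [List.isPrefixOf]
      rw [h1, pvSplit_snoc, if_pos rfl]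
      rw [show ((s.length : Int) + 1).toNat = s.length + 1 from by omega]
      rw [List.drop_eq_nil_of_le (by simp), List.getLastD_concat]
    · have h1 : PySem.Chars.rfind (s ++ [c]) ['\n'] = PySem.Chars.rfind s ['\n'] := by
        rw [PySem.Chars.rfind, PySem.Chars.rfind]
        rw [show (s ++ [c]).length = s.length + 1 from by simp]
        simp only [PySem.Chars.rfind.go]
        rw [if_neg (by
          rw [show List.drop (s.length + 1) (s ++ [c]) = [] from by
            apply List.drop_eq_nil_of_le; simp]
          simp [List.isPrefixOf])]
        exact pv_go_append s c hc s.length (le_refl _)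
      rw [h1, pvSplit_snoc, if_neg hc, List.getLastD_concat]
      have hlt := pv_rfind_lt s
      have hge : -1 ≤ PySem.Chars.rfind s ['\n'] := by
        rw [PySem.Chars.rfind]; exact (pv_go_bounds s ['\n'] s.length).1
      rw [List.drop_append_of_le_length (by omega), ih]

theorem pv_main (s : List Char) (h : s = PySem.Chars.rstrip s) :
    pvScanA (pvSplit s).reverse =
      (let last := List.drop (PySem.Chars.rfind s ['\n'] + 1).toNat s
       if last = [] then (4 : Int)
       else (last.length : Int) - ((PySem.Chars.lstrip last).length : Int)) := by
  induction s using List.reverseRecOn with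
  | nil => simp [pvSplit, pvScanA, PySem.Chars.lstrip]
  | append_singleton s' c _ =>
    have hc : PySem.Chars.isspace c = false := by
      by_contra hcc
      rw [Bool.not_eq_false] at hcc
      have hlen := congrArg List.length h
      rw [PySem.Chars.rstrip] at hlen
      rw [List.reverse_append] at hlen
      simp only [List.reverse_singleton, List.singleton_append, List.dropWhile_cons, hcc,
        if_pos] at hlen
      have hle := List.length_dropWhile_le PySem.Chars.isspace s'.reverse
      rw [List.length_reverse] at hle
      simp at hlen
      omega
    have hnl : c ≠ '\n' := by
      intro hh; rw [hh] at hc; exact absurd hc (by decide)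
    rw [pv_rfind_drop, pvSplit_snoc, if_neg hnl]
    rw [List.getLastD_concat, List.reverse_append]
    simp only [List.reverse_singleton, List.singleton_append]
    rw [pvScanA]
    have hstr : PySem.Chars.lstrip ((pvSplit s').getLastD [] ++ [c]) ≠ [] := by
      rw [PySem.Chars.lstrip]
      intro hnil
      have := (List.dropWhile_eq_nil_iff).mp hnil c (by simp)
      rw [hc] at this
      exact absurd this (by decide)
    simp only [hstr, if_pos, ne_eq, not_false_iff]
    rw [if_neg (by simp)]

-- ===== VERDICT (by name: the statement is the Claim_ definition above) =====
theorem detect_body_indent_py_spec : Claim_equal_detect_body_indent_py := by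
  intro prompt _
  unfold Spec_detect_body_indent_py detect_body_indent_py detect_body_indent_py_alt
  set s := PySem.Chars.rstrip prompt.toList with hs
  have hss : s = PySem.Chars.rstrip s := by
    rw [hs, PySem.Chars.rstrip, PySem.Chars.rstrip]
    rw [List.reverse_reverse, List.dropWhile_idempotent]
  have hge : -1 ≤ PySem.Chars.rfind s ['\n'] := by
    rw [PySem.Chars.rfind]; exact (pv_go_bounds s ['\n'] s.length).1
  have hslice : PySem.Chars.slice s (some (PySem.Chars.rfind s ['\n'] + 1)) none
      = List.drop (PySem.Chars.rfind s ['\n'] + 1).toNat s := by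
    rw [PySem.Chars.slice_eq_listSlice, PySem.List.slice_from]
    omega
  show pvScanA (PySem.Chars.splitOn s ['\n']).reverse =
    (if PySem.Chars.slice s (some (PySem.Chars.rfind s ['\n'] + 1)) none = [] then (4 : Int)
     else ((PySem.Chars.slice s (some (PySem.Chars.rfind s ['\n'] + 1)) none).length : Int)
       - ((PySem.Chars.lstrip (PySem.Chars.slice s (some (PySem.Chars.rfind s ['\n'] + 1)) none)).length : Int))
  rw [pv_splitOn_eq, hslice]
  exact pv_main s hss
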